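-- pv_equiv track=rewrite | github.com/AliGremLahkoNaWC/Programiranje1 | vaje14/zbiranje_osebnih_podatkov.py | ujemanje
-- ===== SOURCE A (Python) =====
-- def ujemanje(oseba1, oseba2):
--
--     tab_razlik = [0,0]
--
--     if len(oseba1) > len(oseba2):
--
--         for key, val in oseba1.items():
--             if key in oseba2 and oseba2[key] == val:
--                 tab_razlik[0] = tab_razlik[0] + 1
--             if key in oseba2 and oseba2[key] != val:
--                 tab_razlik[1] = tab_razlik[1] + 1
--     elif len(oseba2) > len(oseba1):
--         for key, val in oseba2.items():
--             if key in oseba1 and oseba1[key] == val: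
--                 tab_razlik[0] = tab_razlik[0] + 1
--             if key in oseba1 and oseba1[key] != val:
--                 tab_razlik[1] = tab_razlik[1] + 1
--     else:
--         for key, val in oseba1.items():
--             if key in oseba2 and oseba2[key] == val:
--                 tab_razlik[0] = tab_razlik[0] + 1
--             if key in oseba2 and oseba2[key] != val:
--                 tab_razlik[1] = tab_razlik[1] + 1
--
--
--
--
--
--     return tab_razlik
-- ===== SOURCE B (Python) =====
-- def ujemanje(oseba1, oseba2):
--     s1 = sorted(oseba1.items(), key=lambda kv: kv[0])
--     s2 = sorted(oseba2.items(), key=lambda kv: kv[0])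
--     tab = [0, 0]
--     i = j = 0
--     while i < len(s1) and j < len(s2):
--         k1, v1 = s1[i]
--         k2, v2 = s2[j]
--         if k1 < k2:
--             i += 1
--         elif k2 < k1:
--             j += 1
--         else:
--             if v1 == v2:
--                 tab[0] += 1
--             else:
--                 tab[1] += 1
--             i += 1
--             j += 1
--     return tab
-- ===== Notes on version B (the rewrite author's own statement) =====
-- stated objective: alternative
-- what changed: Replaces A's length-branched hash-lookup loops by sorting both item lists by key and counting matches/mismatches in a single two-pointer merge over the two sorted lists (correct because dict keys are unique and the counts are symmetric in the two dicts, so the length comparison is redundant).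
import Mathlib
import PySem

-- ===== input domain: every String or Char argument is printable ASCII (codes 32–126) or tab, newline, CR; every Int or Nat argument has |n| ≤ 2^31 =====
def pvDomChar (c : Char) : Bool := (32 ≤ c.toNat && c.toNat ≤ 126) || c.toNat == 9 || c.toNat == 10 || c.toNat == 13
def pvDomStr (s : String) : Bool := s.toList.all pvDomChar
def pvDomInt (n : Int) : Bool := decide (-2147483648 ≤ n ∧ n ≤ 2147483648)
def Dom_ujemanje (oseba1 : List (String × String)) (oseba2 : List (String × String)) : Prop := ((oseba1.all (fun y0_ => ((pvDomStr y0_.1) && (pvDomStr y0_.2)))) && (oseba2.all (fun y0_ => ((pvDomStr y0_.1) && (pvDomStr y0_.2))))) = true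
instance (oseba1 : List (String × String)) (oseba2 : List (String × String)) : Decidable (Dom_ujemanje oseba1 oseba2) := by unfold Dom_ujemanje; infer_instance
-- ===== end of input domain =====

-- B replaces A's length-branched dict-lookup loops by a different algorithm: sort both item
-- lists by key, then one two-pointer merge counts matches and mismatches (objective: alternative).

-- ===== PORT A =====
-- the loop body shared (verbatim) by A's three branches: for key, val in src.items(): two ifs against dst
def ujemanjeLoop (src dst : List (String × String)) : Int × Int :=
  src.foldl (fun tab kv =>
    let tab1 := if PySem.Dict.contains ⟨dst⟩ kv.1 && (PySem.Dict.get? ⟨dst⟩ kv.1 == some kv.2)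
                then (tab.1 + 1, tab.2) else tab
    if PySem.Dict.contains ⟨dst⟩ kv.1 && !(PySem.Dict.get? ⟨dst⟩ kv.1 == some kv.2)
    then (tab1.1, tab1.2 + 1) else tab1) (0, 0)

def ujemanje (oseba1 : List (String × String)) (oseba2 : List (String × String)) : List Int :=
  if oseba1.length > oseba2.length then
    let t := ujemanjeLoop oseba1 oseba2; [t.1, t.2]
  else if oseba2.length > oseba1.length then
    let t := ujemanjeLoop oseba2 oseba1; [t.1, t.2]
  else
    let t := ujemanjeLoop oseba1 oseba2; [t.1, t.2]

-- ===== PORT B =====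
-- the while loop: two pointers over the two sorted item lists, accumulating tab = (m, mm)
def pvMerge (s1 s2 : List (String × String)) (m mm : Int) : Int × Int :=
  match s1, s2 with
  | [], _ => (m, mm)
  | _, [] => (m, mm)
  | (k1, v1) :: t1, (k2, v2) :: t2 =>
    if k1 < k2 then pvMerge t1 ((k2, v2) :: t2) m mm
    else if k2 < k1 then pvMerge ((k1, v1) :: t1) t2 m mm
    else if v1 == v2 then pvMerge t1 t2 (m + 1) mm
    else pvMerge t1 t2 m (mm + 1)
termination_by s1.length + s2.length

def ujemanje_alt (oseba1 : List (String × String)) (oseba2 : List (String × String)) : List Int :=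
  let s1 := PySem.List.sorted oseba1 (fun kv => kv.1) false
  let s2 := PySem.List.sorted oseba2 (fun kv => kv.1) false
  let t := pvMerge s1 s2 0 0
  [t.1, t.2]

-- ===== PRECONDITION & SPEC =====
-- Pre_ requires distinct keys in each association list: the Python arguments are dicts, whose keys
-- are always unique — an association list with duplicate keys represents no Python input at all.
def Pre_ujemanje (oseba1 : List (String × String)) (oseba2 : List (String × String)) : Prop :=
  (oseba1.map Prod.fst).Nodup ∧ (oseba2.map Prod.fst).Nodup
instance (oseba1 : List (String × String)) (oseba2 : List (String × String)) : Decidable (Pre_ujemanje oseba1 oseba2) := by unfold Pre_ujemanje; infer_instance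

def pvWitness_ujemanje : (List (String × String)) × (List (String × String)) :=
  ([("ime", "Ana"), ("mesto", "Kranj")], [("ime", "Ana"), ("mesto", "Bled"), ("leto", "1999")])

def Spec_ujemanje (oseba1 : List (String × String)) (oseba2 : List (String × String)) (out : List Int) : Prop := out = ujemanje_alt oseba1 oseba2
instance (oseba1 : List (String × String)) (oseba2 : List (String × String)) (out : List Int) : Decidable (Spec_ujemanje oseba1 oseba2 out) := by unfold Spec_ujemanje; infer_instance

-- ===== CLAIM (what is proved, stated in full; the proofs are below) =====
def Claim_equal_ujemanje : Prop := ∀ (oseba1 : List (String × String)) (oseba2 : List (String × String)), Dom_ujemanje oseba1 oseba2 → Pre_ujemanje oseba1 oseba2 → Spec_ujemanje oseba1 oseba2 (ujemanje oseba1 oseba2)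

-- ===== LEMMAS AND PROOFS =====

-- the two counts A's loop computes over src against the dict dst
def cntM (src dst : List (String × String)) : Nat :=
  src.countP (fun kv => PySem.Dict.contains ⟨dst⟩ kv.1 && (PySem.Dict.get? ⟨dst⟩ kv.1 == some kv.2))
def cntX (src dst : List (String × String)) : Nat :=
  src.countP (fun kv => PySem.Dict.contains ⟨dst⟩ kv.1 && !(PySem.Dict.get? ⟨dst⟩ kv.1 == some kv.2))

lemma ujemanjeLoop_counts (src dst : List (String × String)) (a b : Int) :
    src.foldl (fun tab kv =>
      let tab1 := if PySem.Dict.contains ⟨dst⟩ kv.1 && (PySem.Dict.get? ⟨dst⟩ kv.1 == some kv.2)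
                  then (tab.1 + 1, tab.2) else tab
      if PySem.Dict.contains ⟨dst⟩ kv.1 && !(PySem.Dict.get? ⟨dst⟩ kv.1 == some kv.2)
      then (tab1.1, tab1.2 + 1) else tab1) (a, b)
    = (a + (cntM src dst : Int), b + (cntX src dst : Int)) := by
  induction src generalizing a b with
  | nil => simp [cntM, cntX]
  | cons kv t ih =>
    simp only [List.foldl_cons, cntM, cntX, List.countP_cons]
    cases hc : PySem.Dict.contains (⟨dst⟩ : PySem.Dict String String) kv.1 <;>
      cases he : (PySem.Dict.get? (⟨dst⟩ : PySem.Dict String String) kv.1 == some kv.2) <;>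
      simp only [hc, he, Bool.true_and, Bool.false_and, Bool.and_true, Bool.and_false,
        Bool.not_true, Bool.not_false, if_true, if_false] <;>
      rw [ih] <;> rw [Prod.mk.injEq] <;> constructor <;> simp [cntM, cntX] <;> push_cast <;> ring

lemma ujemanjeLoop_eq_counts (src dst : List (String × String)) :
    ujemanjeLoop src dst = ((cntM src dst : Int), (cntX src dst : Int)) := by
  unfold ujemanjeLoop
  rw [ujemanjeLoop_counts]
  simp

-- a cons whose key differs from x is transparent to lookups at x
lemma get?_cons_skip (k2 : String) (v2 : String) (t2 : List (String × String)) (x : String)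
    (h : x ≠ k2) :
    PySem.Dict.get? (⟨(k2, v2) :: t2⟩ : PySem.Dict String String) x
      = PySem.Dict.get? (⟨t2⟩ : PySem.Dict String String) x := by
  rw [PySem.Dict.get?_mk_cons, if_neg]
  simp [Ne.symm h]

lemma cnt_skip_head (src : List (String × String)) (k2 v2 : String) (t2 : List (String × String))
    (h : ∀ kv ∈ src, kv.1 ≠ k2) :
    cntM src ((k2, v2) :: t2) = cntM src t2 ∧ cntX src ((k2, v2) :: t2) = cntX src t2 := by
  constructor <;>
  · apply List.countP_congr
    intro kv hkv
    rw [get?_cons_skip _ _ _ _ (h kv hkv), PySem.Dict.contains_eq_isSome_get?,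
      PySem.Dict.contains_eq_isSome_get?, get?_cons_skip _ _ _ _ (h kv hkv)]

-- the two-pointer merge computes exactly A's counts, on strictly key-sorted inputs
lemma pvMerge_eq (s1 s2 : List (String × String)) (m mm : Int)
    (h1 : s1.Pairwise (fun a b => a.1 < b.1)) (h2 : s2.Pairwise (fun a b => a.1 < b.1)) :
    pvMerge s1 s2 m mm = (m + (cntM s1 s2 : Int), mm + (cntX s1 s2 : Int)) := by
  induction s1, s2, m, mm using pvMerge.induct with
  | case1 s2 m mm => simp [pvMerge, cntM, cntX]
  | case2 s1 m mm h =>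
    have hnil : cntM s1 [] = 0 ∧ cntX s1 [] = 0 := by
      constructor <;>
      · simp only [cntM, cntX, List.countP_eq_zero]
        intro kv _
        simp [PySem.Dict.contains]
    cases s1 with
    | nil => simp [pvMerge, cntM, cntX]
    | cons a t => simp [pvMerge, hnil.1, hnil.2]
  | case3 m mm k1 v1 t1 k2 v2 t2 hlt ih =>
    -- k1 < k2: k1 is below every key of s2, so (k1,v1) contributes nothing
    have habs : PySem.Dict.contains (⟨(k2, v2) :: t2⟩ : PySem.Dict String String) k1 = false := by
      rw [← Bool.not_eq_true, PySem.Dict.contains_iff_mem_keys]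
      intro hmem
      rw [show PySem.Dict.keys (⟨(k2, v2) :: t2⟩ : PySem.Dict String String)
            = ((k2, v2) :: t2).map Prod.fst from rfl] at hmem
      simp only [List.map_cons, List.mem_cons, List.mem_map] at hmem
      rcases hmem with h | ⟨kv, hkv, hk⟩
      · exact absurd (h ▸ hlt) (lt_irrefl _)
      · have := List.rel_of_pairwise_cons h2 hkv
        exact absurd (lt_trans hlt (hk ▸ this)) (lt_irrefl _)
    rw [pvMerge, if_pos hlt, ih (List.Pairwise.sublist (List.sublist_cons_self _ _) h1) h2]
    simp only [cntM, cntX, List.countP_cons, habs, Bool.false_and]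
    simp
  | case4 m mm k1 v1 t1 k2 v2 t2 hnlt hlt ih =>
    -- k2 < k1: k2 is below every key of s1, drop the head of s2
    have hne : ∀ kv ∈ (k1, v1) :: t1, kv.1 ≠ k2 := by
      intro kv hkv
      rcases List.mem_cons.1 hkv with h | h
      · rw [h]; exact fun he => absurd (he ▸ hlt) (lt_irrefl _)
      · have := List.rel_of_pairwise_cons h1 h
        exact fun he => absurd (lt_trans hlt (he ▸ this)) (lt_irrefl _)
    obtain ⟨hm, hx⟩ := cnt_skip_head ((k1, v1) :: t1) k2 v2 t2 hne
    rw [pvMerge, if_neg hnlt, if_pos hlt,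
      ih h1 (List.Pairwise.sublist (List.sublist_cons_self _ _) h2), hm, hx]
  | case5 m mm k1 v1 t1 k2 v2 t2 hnlt hnlt' heq ih =>
    -- k1 = k2 and v1 == v2: the heads match
    have hk : k1 = k2 := le_antisymm (not_lt.1 hnlt') (not_lt.1 hnlt)
    have hget : PySem.Dict.get? (⟨(k2, v2) :: t2⟩ : PySem.Dict String String) k1 = some v2 := by
      rw [PySem.Dict.get?_mk_cons, if_pos (by simp [hk])]
    have hcont : PySem.Dict.contains (⟨(k2, v2) :: t2⟩ : PySem.Dict String String) k1 = true := by
      rw [PySem.Dict.contains_eq_isSome_get?, hget]; rfl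
    have hne : ∀ kv ∈ t1, kv.1 ≠ k2 := by
      intro kv hkv he
      have := List.rel_of_pairwise_cons h1 hkv
      rw [he, ← hk] at this
      exact absurd this (lt_irrefl _)
    obtain ⟨hm, hx⟩ := cnt_skip_head t1 k2 v2 t2 hne
    simp only [cntM, cntX] at hm hx
    have hv : v1 = v2 := eq_of_beq heq
    rw [pvMerge, if_neg hnlt, if_neg hnlt', if_pos heq,
      ih (List.Pairwise.sublist (List.sublist_cons_self _ _) h1)
         (List.Pairwise.sublist (List.sublist_cons_self _ _) h2)]
    simp only [cntM, cntX, List.countP_cons, hcont, hget, hm, hx, Bool.true_and, hv]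
    rw [Prod.mk.injEq]
    constructor <;> simp <;> omega
  | case6 m mm k1 v1 t1 k2 v2 t2 hnlt hnlt' hneq ih =>
    have hk : k1 = k2 := le_antisymm (not_lt.1 hnlt') (not_lt.1 hnlt)
    have hget : PySem.Dict.get? (⟨(k2, v2) :: t2⟩ : PySem.Dict String String) k1 = some v2 := by
      rw [PySem.Dict.get?_mk_cons, if_pos (by simp [hk])]
    have hcont : PySem.Dict.contains (⟨(k2, v2) :: t2⟩ : PySem.Dict String String) k1 = true := by
      rw [PySem.Dict.contains_eq_isSome_get?, hget]; rfl
    have hne : ∀ kv ∈ t1, kv.1 ≠ k2 := by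
      intro kv hkv he
      have := List.rel_of_pairwise_cons h1 hkv
      rw [he, ← hk] at this
      exact absurd this (lt_irrefl _)
    obtain ⟨hm, hx⟩ := cnt_skip_head t1 k2 v2 t2 hne
    simp only [cntM, cntX] at hm hx
    have hvne : v2 ≠ v1 := fun h => hneq (by simp [h])
    rw [pvMerge, if_neg hnlt, if_neg hnlt', if_neg hneq,
      ih (List.Pairwise.sublist (List.sublist_cons_self _ _) h1)
         (List.Pairwise.sublist (List.sublist_cons_self _ _) h2)]
    simp only [cntM, cntX, List.countP_cons, hcont, hget, hm, hx, Bool.true_and]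
    rw [Prod.mk.injEq]
    constructor <;> simp [hvne] <;> omega

-- lookups in ⟨s⟩ agree with ⟨o⟩ when s is a permutation of o and keys are unique
lemma get?_perm (s o : List (String × String)) (hp : s.Perm o) (ho : (o.map Prod.fst).Nodup)
    (k : String) :
    PySem.Dict.get? (⟨s⟩ : PySem.Dict String String) k
      = PySem.Dict.get? (⟨o⟩ : PySem.Dict String String) k := by
  have hs : (s.map Prod.fst).Nodup := ((hp.map Prod.fst).nodup_iff).2 ho
  cases h : PySem.Dict.get? (⟨o⟩ : PySem.Dict String String) k with
  | none =>
    rw [PySem.Dict.get?_eq_none_iff_not_mem_keys] at h ⊢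
    intro hm
    exact h ((hp.map Prod.fst).mem_iff.1 hm)
  | some v =>
    have hmem : (k, v) ∈ o := PySem.Dict.mem_items_of_get?_eq_some _ h
    exact PySem.Dict.get?_of_mem_items _ (hp.mem_iff.2 hmem) hs

lemma cnt_perm (s1 s2 o1 o2 : List (String × String)) (hp1 : s1.Perm o1) (hp2 : s2.Perm o2)
    (ho2 : (o2.map Prod.fst).Nodup) :
    cntM s1 s2 = cntM o1 o2 ∧ cntX s1 s2 = cntX o1 o2 := by
  constructor <;>
  · simp only [cntM, cntX]
    rw [hp1.countP_eq]
    apply List.countP_congr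
    intro kv _
    rw [get?_perm s2 o2 hp2 ho2, PySem.Dict.contains_eq_isSome_get?,
      PySem.Dict.contains_eq_isSome_get?, get?_perm s2 o2 hp2 ho2]

-- symmetry of the counts (distinct keys on both sides)
lemma mem_iff_get? (o : List (String × String)) (ho : (o.map Prod.fst).Nodup)
    (kv : String × String) :
    (PySem.Dict.contains (⟨o⟩ : PySem.Dict String String) kv.1
      && (PySem.Dict.get? (⟨o⟩ : PySem.Dict String String) kv.1 == some kv.2)) = true
    ↔ kv ∈ o := by
  constructor
  · intro h
    rw [Bool.and_eq_true] at h
    have h' := h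
    have hg : PySem.Dict.get? (⟨o⟩ : PySem.Dict String String) kv.1 = some kv.2 :=
      eq_of_beq h'.2
    exact PySem.Dict.mem_items_of_get?_eq_some _ hg
  · intro h
    have hg : PySem.Dict.get? (⟨o⟩ : PySem.Dict String String) kv.1 = some kv.2 :=
      PySem.Dict.get?_of_mem_items _ h ho
    rw [PySem.Dict.contains_eq_isSome_get?, hg]
    simp

lemma cntM_symm (o1 o2 : List (String × String))
    (h1 : (o1.map Prod.fst).Nodup) (h2 : (o2.map Prod.fst).Nodup) :
    cntM o1 o2 = cntM o2 o1 := by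
  have key : ∀ (a b : List (String × String)), (b.map Prod.fst).Nodup →
      cntM a b = (a.filter (fun kv => decide (kv ∈ b))).length := by
    intro a b hb
    rw [cntM, List.countP_eq_length_filter]
    congr 1
    apply List.filter_congr
    intro kv _
    rw [Bool.eq_iff_iff, mem_iff_get? b hb kv, decide_eq_true_iff]
  have e1 := key o1 o2 h2
  have e2 := key o2 o1 h1
  rw [e1, e2]
  apply List.Perm.length_eq
  rw [List.perm_ext_iff_of_nodup ((h1.of_map).filter _) ((h2.of_map).filter _)]
  intro kv
  simp only [List.mem_filter, decide_eq_true_eq]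
  exact ⟨fun ⟨a, b⟩ => ⟨b, a⟩, fun ⟨a, b⟩ => ⟨b, a⟩⟩

lemma cntC_symm (o1 o2 : List (String × String))
    (h1 : (o1.map Prod.fst).Nodup) (h2 : (o2.map Prod.fst).Nodup) :
    o1.countP (fun kv => PySem.Dict.contains (⟨o2⟩ : PySem.Dict String String) kv.1)
      = o2.countP (fun kv => PySem.Dict.contains (⟨o1⟩ : PySem.Dict String String) kv.1) := by
  have key : ∀ (a b : List (String × String)),
      a.countP (fun kv => PySem.Dict.contains (⟨b⟩ : PySem.Dict String String) kv.1)
        = ((a.map Prod.fst).filter (fun k => decide (k ∈ b.map Prod.fst))).length := by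
    intro a b
    have hcomp : (fun kv : String × String => PySem.Dict.contains (⟨b⟩ : PySem.Dict String String) kv.1)
        = ((fun k => PySem.Dict.contains (⟨b⟩ : PySem.Dict String String) k) ∘ Prod.fst) := rfl
    rw [hcomp, ← List.countP_map, List.countP_eq_length_filter]
    congr 1
    apply List.filter_congr
    intro k _
    rw [Bool.eq_iff_iff, PySem.Dict.contains_iff_mem_keys, decide_eq_true_iff]
    simp [PySem.Dict.keys]
  rw [key, key]
  apply List.Perm.length_eq
  rw [List.perm_ext_iff_of_nodup (h1.filter _) (h2.filter _)]
  intro k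
  simp only [List.mem_filter, decide_eq_true_eq]
  exact ⟨fun ⟨a, b⟩ => ⟨b, a⟩, fun ⟨a, b⟩ => ⟨b, a⟩⟩

lemma countP_and_split {α : Type} (l : List α) (p q : α → Bool) :
    l.countP (fun x => p x && q x) + l.countP (fun x => p x && !q x) = l.countP p := by
  induction l with
  | nil => simp
  | cons a t ih =>
    cases hp : p a <;> cases hq : q a <;>
      simp only [List.countP_cons, hp, hq, Bool.true_and, Bool.false_and, Bool.and_true,
        Bool.and_false, Bool.not_true, Bool.not_false, Bool.false_eq_true, eq_self_iff_true,
        if_false, if_true] <;> omega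

lemma cnt_split (o1 o2 : List (String × String)) :
    cntM o1 o2 + cntX o1 o2
      = o1.countP (fun kv => PySem.Dict.contains (⟨o2⟩ : PySem.Dict String String) kv.1) := by
  unfold cntM cntX
  exact countP_and_split o1
    (fun kv => PySem.Dict.contains (⟨o2⟩ : PySem.Dict String String) kv.1)
    (fun kv => PySem.Dict.get? (⟨o2⟩ : PySem.Dict String String) kv.1 == some kv.2)

lemma cntX_symm (o1 o2 : List (String × String))
    (h1 : (o1.map Prod.fst).Nodup) (h2 : (o2.map Prod.fst).Nodup) :
    cntX o1 o2 = cntX o2 o1 := by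
  have hs1 := cnt_split o1 o2
  have hs2 := cnt_split o2 o1
  have hc := cntC_symm o1 o2 h1 h2
  have hm := cntM_symm o1 o2 h1 h2
  omega

-- the sorted lists are strictly key-increasing when the keys are distinct
lemma sorted_strict (o : List (String × String)) (ho : (o.map Prod.fst).Nodup) :
    (PySem.List.sorted o (fun kv => kv.1) false).Pairwise (fun a b => a.1 < b.1) := by
  have hle := PySem.List.sorted_pairwise o (fun kv => kv.1) (κ := String)
  have hperm := PySem.List.sorted_perm o (fun kv => kv.1) false
  have hnd : ((PySem.List.sorted o (fun kv => kv.1) false).map Prod.fst).Nodup :=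
    ((hperm.map Prod.fst).nodup_iff).2 ho
  have hne : (PySem.List.sorted o (fun kv => kv.1) false).Pairwise
      (fun a b => a.1 ≠ b.1) := List.pairwise_map.1 hnd
  exact (hle.and hne).imp (fun h => lt_of_le_of_ne h.1 h.2)

-- ===== VERDICT (by name: the statement is the Claim_ definition above) =====
theorem ujemanje_spec : Claim_equal_ujemanje := by
  intro o1 o2 _hd hpre
  obtain ⟨h1, h2⟩ := hpre
  unfold Spec_ujemanje
  have hp1 := PySem.List.sorted_perm o1 (fun kv => kv.1) false
  have hp2 := PySem.List.sorted_perm o2 (fun kv => kv.1) false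
  obtain ⟨hm, hx⟩ := cnt_perm _ _ o1 o2 hp1 hp2 h2
  have halt : ujemanje_alt o1 o2 = [((cntM o1 o2 : Nat) : Int), ((cntX o1 o2 : Nat) : Int)] := by
    show [(pvMerge (PySem.List.sorted o1 (fun kv => kv.1) false)
            (PySem.List.sorted o2 (fun kv => kv.1) false) 0 0).1,
          (pvMerge (PySem.List.sorted o1 (fun kv => kv.1) false)
            (PySem.List.sorted o2 (fun kv => kv.1) false) 0 0).2] = _
    rw [pvMerge_eq _ _ _ _ (sorted_strict o1 h1) (sorted_strict o2 h2), hm, hx]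
    simp
  rw [halt]
  unfold ujemanje
  split_ifs with hL1 hL2
  · show [(ujemanjeLoop o1 o2).1, (ujemanjeLoop o1 o2).2] = _
    rw [ujemanjeLoop_eq_counts]
  · show [(ujemanjeLoop o2 o1).1, (ujemanjeLoop o2 o1).2] = _
    rw [ujemanjeLoop_eq_counts, cntM_symm o2 o1 h2 h1, cntX_symm o2 o1 h2 h1]
  · show [(ujemanjeLoop o1 o2).1, (ujemanjeLoop o1 o2).2] = _
    rw [ujemanjeLoop_eq_counts]
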